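-- pv_equiv track=rewrite | github.com/sungyeong98/leetcode | 1717-maximum-score-from-removing-substrings/1717-maximum-score-from-removing-substrings.py | gain_x
-- ===== SOURCE A (Python) =====
-- def gain_x(s,x):
--     score=0
--     while 'ab' in s:
--         l=len(s)
--         s=s.split('ab')
--         s=''.join([i for i in s if i])
--
--         score+=x*((l-len(s))//2)
--     return score,s
-- ===== SOURCE B (Python) =====
-- def gain_x(s, x):
--     stack = []
--     count = 0
--     for c in s:
--         if c == 'b' and stack and stack[-1] == 'a':
--             stack.pop()
--             count += 1
--         else:
--             stack.append(c)
--     return x * count, ''.join(stack)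
-- ===== Notes on version B (the rewrite author's own statement) =====
-- stated objective: alternative
-- what changed: Replaced the repeated split/join rounds (rescanning the string until no 'ab' remains) by a single left-to-right stack pass that cancels each 'b' against a preceding 'a'; B is O(n) worst case, but on random inputs A's C-implemented str.split makes it comparably fast, so no speed is claimed.
import Mathlib
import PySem

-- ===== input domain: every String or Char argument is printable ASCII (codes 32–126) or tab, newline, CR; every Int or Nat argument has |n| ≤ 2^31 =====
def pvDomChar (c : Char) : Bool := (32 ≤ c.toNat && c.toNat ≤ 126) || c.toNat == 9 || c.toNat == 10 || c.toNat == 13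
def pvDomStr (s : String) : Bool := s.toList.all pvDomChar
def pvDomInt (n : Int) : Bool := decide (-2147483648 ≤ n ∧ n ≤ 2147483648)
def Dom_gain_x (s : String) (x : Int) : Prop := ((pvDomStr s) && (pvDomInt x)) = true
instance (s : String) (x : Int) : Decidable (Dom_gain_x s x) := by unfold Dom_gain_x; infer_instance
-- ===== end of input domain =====

-- B replaces A's repeated split/join rounds by a single left-to-right stack pass over the characters (objective: alternative single-pass algorithm).

-- ===== PORT A =====
-- while 'ab' in s: split on 'ab', drop empty pieces, join, score += x*((l-len(s))//2).
-- The while loop is ported with fuel len(s)+1; it always suffices because each round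
-- with 'ab' present strictly shortens s (proved in pvRem_len_lt / pvMain below).
def gain_x_loop (x : Int) : Nat → Int → String → Int × String
  | 0, score, s => (score, s)
  | fuel+1, score, s =>
    if PySem.Str.isIn "ab" s then
      let l : Int := PySem.Str.len s
      let parts : List String := (PySem.Str.split? s "ab").getD []   -- sep "ab" ≠ "": split? is always some
      let s2 : String := PySem.Str.join "" (parts.filter (fun i => !(i == "")))
      gain_x_loop x fuel (score + x * PySem.Int.floordiv (l - PySem.Str.len s2) 2) s2
    else (score, s)

def gain_x (s : String) (x : Int) : Int × String := gain_x_loop x (s.toList.length + 1) 0 s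

-- ===== PORT B =====
-- one pass over the characters: push each char; a 'b' arriving on top of an 'a' cancels it and counts one removal
def pvStep (p : List Char × Int) (c : Char) : List Char × Int :=
  if c = 'b' then
    match p.1 with
    | 'a' :: rest => (rest, p.2 + 1)
    | _ => (c :: p.1, p.2)
  else (c :: p.1, p.2)

def gain_x_alt (s : String) (x : Int) : Int × String :=
  let r := s.toList.foldl pvStep ([], 0)
  (x * r.2, String.ofList r.1.reverse)

-- ===== PRECONDITION & SPEC =====
def Spec_gain_x (s : String) (x : Int) (out : Int × String) : Prop := out = gain_x_alt s x
instance (s : String) (x : Int) (out : Int × String) : Decidable (Spec_gain_x s x out) := by unfold Spec_gain_x; infer_instance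

-- ===== CLAIM (what is proved, stated in full; the proofs are below) =====
def Claim_equal_gain_x : Prop := ∀ (s : String) (x : Int), Dom_gain_x s x → Spec_gain_x s x (gain_x s x)

-- ===== LEMMAS AND PROOFS =====

-- stack-only step: the first component of pvStep does not depend on the count
def pvStep1 (st : List Char) (c : Char) : List Char :=
  if c = 'b' then
    match st with
    | 'a' :: rest => rest
    | _ => c :: st
  else c :: st

-- one round of A: remove all left-to-right non-overlapping "ab"
def pvRem : List Char → List Char
  | 'a' :: 'b' :: t => pvRem t
  | c :: t => c :: pvRem t
  | [] => []

lemma pvStep_pair (st : List Char) (n : Int) (c : Char) :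
    pvStep (st, n) c = (pvStep1 st c, if c = 'b' ∧ st.head? = some 'a' then n + 1 else n) := by
  unfold pvStep pvStep1
  by_cases hb : c = 'b' <;> simp [hb]
  cases st with
  | nil => simp
  | cons h t => by_cases ha : h = 'a' <;> simp [ha]

lemma pvStep_fst (l : List Char) : ∀ (st : List Char) (n : Int),
    (l.foldl pvStep (st, n)).1 = l.foldl pvStep1 st := by
  induction l with
  | nil => intro st n; rfl
  | cons c t ih => intro st n; simp [List.foldl_cons, pvStep_pair, ih]

lemma pvStep1_len (st : List Char) (c : Char) :
    ((pvStep1 st c).length : Int) = if c = 'b' ∧ st.head? = some 'a' then (st.length : Int) - 1 else st.length + 1 := by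
  unfold pvStep1
  by_cases hb : c = 'b' <;> simp [hb]
  cases st with
  | nil => simp
  | cons h t => by_cases ha : h = 'a' <;> simp [ha]

-- twice the removal count plus the stack size is the number of characters consumed
lemma pvStep_cnt (l : List Char) : ∀ (st : List Char) (n : Int),
    2 * (l.foldl pvStep (st, n)).2 + ((l.foldl pvStep1 st).length : Int)
      = 2 * n + st.length + l.length := by
  induction l with
  | nil => intro st n; simp
  | cons c t ih =>
    intro st n
    simp only [List.foldl_cons, pvStep_pair]
    rw [ih]
    have hl := pvStep1_len st c
    by_cases h : c = 'b' ∧ st.head? = some 'a' <;> simp [h] at hl ⊢ <;> rw [hl] <;> ring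

-- the final stack is invariant under one split/join round of A
lemma pvRem_stk (l : List Char) : ∀ st : List Char,
    (pvRem l).foldl pvStep1 st = l.foldl pvStep1 st := by
  induction l using pvRem.induct with
  | case1 t ih => intro st; simp only [pvRem, List.foldl_cons, ih]; rfl
  | case2 c t hne ih => intro st; rw [pvRem.eq_2 c t hne]; simp only [List.foldl_cons, ih]
  | case3 => intro st; rfl

lemma pvRem_len_le (l : List Char) : (pvRem l).length ≤ l.length := by
  induction l using pvRem.induct with
  | case1 t ih => simp only [pvRem, List.length_cons]; omega
  | case2 c t hne ih => rw [pvRem.eq_2 c t hne]; simp only [List.length_cons]; omega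
  | case3 => simp [pvRem]

lemma pvRem_len_lt (l : List Char) : ['a','b'] <:+: l → (pvRem l).length < l.length := by
  induction l using pvRem.induct with
  | case1 t ih =>
    intro _
    have := pvRem_len_le t
    simp only [pvRem, List.length_cons]; omega
  | case2 c t hne ih =>
    intro h
    rcases List.infix_cons_iff.mp h with hp | hi
    · obtain ⟨u, hu⟩ := hp
      simp only [List.cons_append, List.nil_append] at hu
      cases hu
      exact (hne u rfl rfl).elim
    · have := ih hi
      rw [pvRem.eq_2 c t hne]; simp only [List.length_cons]; omega
  | case3 => intro h; exact absurd (List.eq_nil_of_infix_nil h) (by simp)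

-- on an "ab"-free string the stack pass just copies the characters
lemma pvStk_noab (l : List Char) : ∀ st : List Char, ¬ (['a','b'] <:+: (st.reverse ++ l)) →
    l.foldl pvStep1 st = l.reverse ++ st := by
  induction l with
  | nil => intro st h; simp
  | cons c t ih =>
    intro st h
    have hstep : pvStep1 st c = c :: st := by
      unfold pvStep1
      by_cases hb : c = 'b' <;> simp [hb]
      cases st with
      | nil => simp
      | cons hd r =>
        by_cases ha : hd = 'a' <;> simp [ha]
        exfalso
        apply h
        subst hb ha
        exact ⟨r.reverse, t, by simp⟩
    rw [List.foldl_cons, hstep, ih (c :: st) (by simpa using h)]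
    simp

lemma pvJoinNil (ps : List (List Char)) : PySem.Chars.join [] ps = ps.flatten := by
  induction ps with
  | nil => simp [PySem.Chars.join_nil]
  | cons p q ih =>
    cases q with
    | nil => simp [PySem.Chars.join_singleton]
    | cons b r => rw [PySem.Chars.join_cons_cons, ih]; simp

lemma pvFlattenFilter (ps : List (List Char)) :
    (ps.filter (fun p => !p.isEmpty)).flatten = ps.flatten := by
  induction ps with
  | nil => rfl
  | cons p q ih =>
    by_cases h : p.isEmpty <;> simp [h, ih]
    simp [List.isEmpty_iff] at h
    simp [h]

-- concatenating the pieces of split('ab') removes exactly the left-to-right "ab" occurrences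
lemma pvGo (fuel : Nat) : ∀ (l cur : List Char) (accs : List (List Char)), l.length ≤ fuel →
    (PySem.Chars.splitOn.go ['a','b'] fuel l cur accs).flatten
      = accs.reverse.flatten ++ cur.reverse ++ pvRem l := by
  induction fuel with
  | zero =>
    intro l cur accs h
    have : l = [] := List.eq_nil_of_length_eq_zero (Nat.le_zero.mp h)
    subst this
    simp [PySem.Chars.splitOn.go, pvRem]
  | succ fuel ih =>
    intro l cur accs h
    cases l with
    | nil => simp [PySem.Chars.splitOn.go, pvRem]
    | cons c rest =>
      rw [PySem.Chars.splitOn.go]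
      by_cases hp : List.isPrefixOf ['a','b'] (c :: rest)
      · obtain ⟨u, hu⟩ := List.isPrefixOf_iff_prefix.mp hp
        simp only [List.cons_append, List.nil_append] at hu
        cases hu
        simp only [hp, if_true]
        rw [ih]
        · simp [pvRem]
        · simp at h ⊢; omega
      · simp only [hp, Bool.false_eq_true, if_false]
        rw [ih]
        · have hne : ∀ (t1 : List Char), c = 'a' → rest = 'b' :: t1 → False := by
            intro t1 hc ht; subst hc; subst ht
            exact hp (by simp)
          rw [pvRem.eq_2 c rest hne]
          simp
        · simp at h ⊢; omega

lemma pvSplitFlatten (cs : List Char) :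
    (PySem.Chars.splitOn cs ['a','b']).flatten = pvRem cs := by
  unfold PySem.Chars.splitOn
  simpa using pvGo (cs.length + 1) cs [] [] (by omega)

-- the body of A's loop computes one pvRem round
lemma pvSplitJoin (s : String) :
    (PySem.Str.join "" (((PySem.Str.split? s "ab").getD []).filter (fun i => !(i == "")))).toList
      = pvRem s.toList := by
  have h1 : PySem.Str.split? s "ab" = some ((PySem.Chars.splitOn s.toList ['a','b']).map String.ofList) := by
    simp [PySem.Str.split?, PySem.Chars.split?]
  rw [h1, Option.getD_some, PySem.Str.toList_join]
  have h2 : ((PySem.Chars.splitOn s.toList ['a','b']).map String.ofList).filter (fun i => !(i == ""))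
      = ((PySem.Chars.splitOn s.toList ['a','b']).filter (fun p => !p.isEmpty)).map String.ofList := by
    rw [List.filter_map]
    congr 1
    apply List.filter_congr
    intro p _
    have hiff : (String.ofList p = "") ↔ p = [] := by
      constructor
      · intro h; simpa using congrArg String.toList h
      · intro h; subst h; rfl
    rw [Bool.eq_iff_iff]
    simp [hiff, List.isEmpty_iff]
  rw [h2, List.map_map]
  have h3 : (String.toList ∘ String.ofList) = id := by funext p; simp
  have h0 : "".toList = ([] : List Char) := rfl
  rw [h3, List.map_id, h0, pvJoinNil, pvFlattenFilter, pvSplitFlatten]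

lemma pvLen_ofList (l : List Char) : PySem.Str.len (String.ofList l) = (l.length : Int) := by
  simp [PySem.Str.len]

-- A's whole loop equals B's single stack pass
lemma pvMain (x : Int) (fuel : Nat) : ∀ (l : List Char) (score : Int), l.length < fuel →
    gain_x_loop x fuel score (String.ofList l)
      = (score + x * (l.foldl pvStep ([], 0)).2,
         String.ofList ((l.foldl pvStep ([], 0)).1.reverse)) := by
  induction fuel with
  | zero => intro l score h; omega
  | succ fuel ih =>
    intro l score h
    rw [gain_x_loop]
    by_cases hin : PySem.Str.isIn "ab" (String.ofList l) = true
    · have hinf : ['a','b'] <:+: l := by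
        have := (PySem.Str.isIn_iff_infix _ _).mp hin
        simpa using this
      simp only [hin, if_true]
      have hs2 : (PySem.Str.join "" ((((PySem.Str.split? (String.ofList l) "ab").getD []).filter (fun i => !(i == "")))) ).toList = pvRem l := by
        have := pvSplitJoin (String.ofList l)
        simpa using this
      set s2 := PySem.Str.join "" ((((PySem.Str.split? (String.ofList l) "ab").getD []).filter (fun i => !(i == "")))) with hs2def
      have hs2' : s2 = String.ofList (pvRem l) := by
        rw [← hs2]; simp
      rw [hs2', pvLen_ofList, pvLen_ofList]
      rw [ih (pvRem l) _ (by have := pvRem_len_lt l hinf; omega)]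
      have e1 := pvStep_cnt l [] 0
      have e2 := pvStep_cnt (pvRem l) [] 0
      have estk : (pvRem l).foldl pvStep1 [] = l.foldl pvStep1 [] := pvRem_stk l []
      rw [estk] at e2
      have hfst : ((pvRem l).foldl pvStep (([] : List Char), (0:Int))).1 = (l.foldl pvStep (([] : List Char), (0:Int))).1 := by
        rw [pvStep_fst, pvStep_fst, estk]
      have hD : (l.length : Int) - ((pvRem l).length : Int)
          = 2 * ((l.foldl pvStep (([] : List Char), (0:Int))).2 - ((pvRem l).foldl pvStep (([] : List Char), (0:Int))).2) := by
        omega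
      rw [Prod.mk.injEq]
      refine ⟨?_, ?_⟩
      · rw [hD]
        rw [PySem.Int.floordiv_eq_ediv_of_pos (by norm_num)]
        rw [Int.mul_ediv_cancel_left _ (by norm_num)]
        ring
      · rw [hfst]
    · have hninf : ¬ (['a','b'] <:+: l) := by
        intro hc
        exact hin ((PySem.Str.isIn_iff_infix _ _).mpr (by simpa using hc))
      simp only [hin, if_false]
      have hstk : l.foldl pvStep1 [] = l.reverse := by
        simpa using pvStk_noab l [] (by simpa using hninf)
      have e1 := pvStep_cnt l [] 0
      rw [hstk] at e1
      have hcnt : (l.foldl pvStep (([] : List Char), (0:Int))).2 = 0 := by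
        simp at e1; omega
      have hfst : (l.foldl pvStep (([] : List Char), (0:Int))).1 = l.reverse := by
        rw [pvStep_fst, hstk]
      rw [hcnt, hfst]
      simp

-- ===== VERDICT (by name: the statement is the Claim_ definition above) =====
theorem gain_x_spec : Claim_equal_gain_x := by
  intro s x _
  unfold Spec_gain_x gain_x gain_x_alt
  have := pvMain x (s.toList.length + 1) s.toList 0 (by omega)
  rw [String.ofList_toList] at this
  rw [this]
  simp
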